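-- pv_equiv track=rewrite | github.com/mustafaalpyanikoglu/Python-Word-Frequency | main.py | clearSymbols
-- ===== SOURCE A (Python) =====
-- def clearSymbols(allWords):
--     wordsWithoutSymbols = []
--     symbols = "!@$^*()_+{}\"<>?,./:'[]-="+chr(775)
--     for word in allWords:
--         for symbol in symbols:
--             if symbol in word:
--                 word = word.replace(symbol, "")
--         if(len(word) > 0):
--             wordsWithoutSymbols.append(word)
--     return wordsWithoutSymbols
-- ===== SOURCE B (Python) =====
-- def clearSymbols(allWords):
--     symbols = set("!@$^*()_+{}\"<>?,./:'[]-=" + chr(775))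
--     cleaned = (''.join(c for c in word if c not in symbols) for word in allWords)
--     return [w for w in cleaned if w]
-- ===== Notes on version B (the rewrite author's own statement) =====
-- stated objective: simpler
-- what changed: Instead of looping over the symbol list and rebuilding the word with str.replace per symbol, B builds the symbol set once and makes a single pass over each word's characters, keeping those not in the set.
import Mathlib
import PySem

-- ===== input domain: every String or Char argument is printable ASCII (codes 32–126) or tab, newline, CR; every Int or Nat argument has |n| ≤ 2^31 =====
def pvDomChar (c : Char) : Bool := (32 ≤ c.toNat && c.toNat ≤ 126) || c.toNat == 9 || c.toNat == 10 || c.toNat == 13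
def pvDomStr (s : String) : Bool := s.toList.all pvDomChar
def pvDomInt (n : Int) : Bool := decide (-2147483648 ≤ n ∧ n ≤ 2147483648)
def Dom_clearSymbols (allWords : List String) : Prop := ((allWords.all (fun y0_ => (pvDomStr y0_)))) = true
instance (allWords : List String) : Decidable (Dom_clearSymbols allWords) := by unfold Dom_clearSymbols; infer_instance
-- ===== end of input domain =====

-- B replaces A's per-symbol str.replace loop by one pass over each word's characters with a symbol set; objective: simpler.

-- ===== PORT A =====
-- the symbols string of A, "!@$^*()_+{}\"<>?,./:'[]-=" + chr(775)
def pvSymbolsA : String := "!@$^*()_+{}\"<>?,./:'[]-=" ++ String.ofList [Char.ofNat 775]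

def clearSymbols (allWords : List String) : List String :=
  allWords.foldl (fun wordsWithoutSymbols word =>
    let w := pvSymbolsA.toList.foldl (fun word symbol =>
      if PySem.Str.isIn (String.ofList [symbol]) word
      then PySem.Str.replace word (String.ofList [symbol]) ""
      else word) word
    if PySem.Str.len w > 0 then wordsWithoutSymbols ++ [w] else wordsWithoutSymbols) []

-- ===== PORT B =====
def pvSymbolsB : PySem.Set Char :=
  PySem.Set.ofList ("!@$^*()_+{}\"<>?,./:'[]-=".toList ++ [Char.ofNat 775])

def clearSymbols_alt (allWords : List String) : List String :=
  (allWords.map (fun word =>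
      String.ofList (word.toList.filter (fun c => !(pvSymbolsB.contains c))))).filter
    (fun w => w != "")

-- ===== PRECONDITION & SPEC =====
def Spec_clearSymbols (allWords : List String) (out : List String) : Prop := out = clearSymbols_alt allWords
instance (allWords : List String) (out : List String) : Decidable (Spec_clearSymbols allWords out) := by unfold Spec_clearSymbols; infer_instance

-- ===== CLAIM (what is proved, stated in full; the proofs are below) =====
def Claim_equal_clearSymbols : Prop := ∀ (allWords : List String), Dom_clearSymbols allWords → Spec_clearSymbols allWords (clearSymbols allWords)

-- ===== LEMMAS AND PROOFS =====

-- replace.go with a single-char pattern and empty replacement filters that char out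
lemma replace_go_single (c : Char) (fuel : Nat) : ∀ (l acc : List Char), l.length ≤ fuel →
    PySem.Chars.replace.go [c] [] fuel l acc = acc.reverse ++ l.filter (fun x => x != c) := by
  induction fuel with
  | zero =>
    intro l acc h
    have : l = [] := List.length_eq_zero_iff.mp (Nat.le_zero.mp h)
    subst this
    simp [PySem.Chars.replace.go]
  | succ n ih =>
    intro l acc h
    cases l with
    | nil => simp [PySem.Chars.replace.go]
    | cons ch t =>
      by_cases hc : ch = c
      · subst hc
        have hpre : List.isPrefixOf [ch] (ch :: t) = true := by simp [List.isPrefixOf]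
        rw [PySem.Chars.replace.go]
        simp only [hpre, if_pos, List.length_cons, List.length_nil, Nat.zero_add,
          List.drop_succ_cons, List.drop_zero, List.reverse_nil, List.nil_append]
        rw [ih t acc (by simpa using Nat.le_of_succ_le_succ h)]
        simp
      · have hpre : List.isPrefixOf [c] (ch :: t) = false := by
          simp [List.isPrefixOf]
          exact fun hh => (hc hh.symm).elim
        rw [PySem.Chars.replace.go]
        simp only [hpre]
        rw [ih t (ch :: acc) (by simpa using Nat.le_of_succ_le_succ h)]
        simp [hc]

lemma replace_single (c : Char) (l : List Char) :
    PySem.Chars.replace l [c] [] = l.filter (fun x => x != c) := by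
  rw [PySem.Chars.replace]
  simpa using replace_go_single c l.length l [] le_rfl

lemma singleton_infix_iff (c : Char) (l : List Char) : [c] <:+: l ↔ c ∈ l := by
  constructor
  · rintro ⟨s, t, rfl⟩; simp
  · intro h
    obtain ⟨s, t, rfl⟩ := List.append_of_mem h
    exact ⟨s, t, by simp⟩

-- one step of A's inner loop filters one symbol out
lemma step_toList (s : Char) (word : String) :
    (if PySem.Str.isIn (String.ofList [s]) word
     then PySem.Str.replace word (String.ofList [s]) ""
     else word).toList = word.toList.filter (fun x => x != s) := by
  by_cases h : PySem.Str.isIn (String.ofList [s]) word = true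
  · rw [if_pos h, PySem.Str.toList_replace]
    simpa using replace_single s word.toList
  · rw [if_neg h]
    have h' : PySem.Chars.isIn [s] word.toList = false := by
      have := PySem.Str.isIn_eq (String.ofList [s]) word
      simp only [String.toList_ofList] at this
      rw [← this]; exact Bool.eq_false_iff.mpr h
    have hmem : s ∉ word.toList := by
      intro hm
      exact (PySem.Chars.isIn_eq_false_iff [s] word.toList).mp h'
        ((singleton_infix_iff s word.toList).mpr hm)
    symm
    apply List.filter_eq_self.mpr
    intro a ha
    simp only [bne_iff_ne, ne_eq]
    intro hh
    exact hmem (hh ▸ ha)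

-- A's inner foldl over a symbol list filters all of them out
lemma foldA_toList (syms : List Char) : ∀ (word : String),
    (syms.foldl (fun word symbol =>
      if PySem.Str.isIn (String.ofList [symbol]) word
      then PySem.Str.replace word (String.ofList [symbol]) ""
      else word) word).toList = word.toList.filter (fun x => !syms.contains x) := by
  induction syms with
  | nil => intro word; simp
  | cons s rest ih =>
    intro word
    rw [List.foldl_cons, ih]
    have := step_toList s word
    rw [this, List.filter_filter]
    apply List.filter_congr
    intro a _
    simp only [Bool.and_comm, bne]
    rcases eq_or_ne a s with h | h <;> simp [h]

set_option maxRecDepth 8000 in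
lemma symbolsB_eq : pvSymbolsB = pvSymbolsA.toList := by decide

lemma symbols_contains (c : Char) :
    pvSymbolsB.contains c = pvSymbolsA.toList.contains c := by
  rw [PySem.Set.contains, symbolsB_eq]

-- per word, A's cleaned word equals B's cleaned word
lemma clean_eq (word : String) :
    (pvSymbolsA.toList.foldl (fun word symbol =>
      if PySem.Str.isIn (String.ofList [symbol]) word
      then PySem.Str.replace word (String.ofList [symbol]) ""
      else word) word)
    = String.ofList (word.toList.filter (fun c => !(pvSymbolsB.contains c))) := by
  apply String.toList_inj.mp
  rw [foldA_toList]
  simp only [String.toList_ofList]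
  apply List.filter_congr
  intro a _
  rw [symbols_contains]

set_option maxRecDepth 8000 in
lemma main_fold (l : List String) : ∀ (acc : List String),
    l.foldl (fun wordsWithoutSymbols word =>
      let w := pvSymbolsA.toList.foldl (fun word symbol =>
        if PySem.Str.isIn (String.ofList [symbol]) word
        then PySem.Str.replace word (String.ofList [symbol]) ""
        else word) word
      if PySem.Str.len w > 0 then wordsWithoutSymbols ++ [w] else wordsWithoutSymbols) acc
    = acc ++ clearSymbols_alt l := by
  induction l with
  | nil =>
    intro acc
    rw [List.foldl_nil]
    unfold clearSymbols_alt
    rw [List.map_nil, List.filter_nil, List.append_nil]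
  | cons word t ih =>
    intro acc
    rw [List.foldl_cons, ih, clean_eq]
    show (if PySem.Str.len (String.ofList (word.toList.filter (fun c => !(pvSymbolsB.contains c)))) > 0
          then acc ++ [String.ofList (word.toList.filter (fun c => !(pvSymbolsB.contains c)))]
          else acc) ++ clearSymbols_alt t = acc ++ clearSymbols_alt (word :: t)
    set cw := String.ofList (word.toList.filter (fun c => !(pvSymbolsB.contains c))) with hcw
    have hlen : (PySem.Str.len cw > 0) ↔ (cw != "") = true := by
      rw [PySem.Str.len_eq, gt_iff_lt, Int.natCast_pos, List.length_pos_iff, bne_iff_ne]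
      exact not_congr (by rw [← String.toList_inj, show ("" : String).toList = [] from rfl])
    have halt : clearSymbols_alt (word :: t)
        = (if (cw != "") = true then cw :: clearSymbols_alt t else clearSymbols_alt t) := by
      unfold clearSymbols_alt
      rw [List.map_cons, List.filter_cons, ← hcw]
    rw [halt]
    by_cases h : PySem.Str.len cw > 0
    · rw [if_pos h, if_pos (hlen.mp h), List.append_assoc, List.singleton_append]
    · rw [if_neg h, if_neg (fun hb => h (hlen.mpr hb))]

-- ===== VERDICT (by name: the statement is the Claim_ definition above) =====
set_option maxRecDepth 8000 in
theorem clearSymbols_spec : Claim_equal_clearSymbols := by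
  intro allWords _
  show clearSymbols allWords = clearSymbols_alt allWords
  unfold clearSymbols
  exact (main_fold allWords []).trans (List.nil_append _)
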